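-- pv_equiv track=rewrite | github.com/jselvaraaj/anki-deck-manager | src/ankidmpy/builder.py | _collectDeckMedia
-- ===== SOURCE A (Python) =====
-- def _collectDeckMedia(media_files, values):
--     result = []
--     seen = set()
--     for value in values:
--         if value is None:
--             continue
--         text = str(value)
--         for media_file in media_files:
--             if media_file in seen:
--                 continue
--             if text and media_file in text:
--                 seen.add(media_file)
--                 result.append(media_file)
--     return result
-- ===== SOURCE B (Python) =====
-- def _collectDeckMedia(media_files, values):
--     texts = [str(v) for v in values if v is not None]
--     buckets = [[] for _ in texts]
--     for m in dict.fromkeys(media_files):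
--         for i, t in enumerate(texts):
--             if t and m in t:
--                 buckets[i].append(m)
--                 break
--     return [m for bucket in buckets for m in bucket]
-- ===== Notes on version B (the rewrite author's own statement) =====
-- stated objective: alternative
-- what changed: B inverts the traversal: instead of A's value-major nested scan with a 'seen' set, B is media-major - for each distinct media file it scans the values once to find the FIRST value containing it (early break), buckets it under that value's index, and finally flattens the buckets; correct because A emits each media file exactly at its first containing value, ordered by value index then media order.
import Mathlib
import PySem

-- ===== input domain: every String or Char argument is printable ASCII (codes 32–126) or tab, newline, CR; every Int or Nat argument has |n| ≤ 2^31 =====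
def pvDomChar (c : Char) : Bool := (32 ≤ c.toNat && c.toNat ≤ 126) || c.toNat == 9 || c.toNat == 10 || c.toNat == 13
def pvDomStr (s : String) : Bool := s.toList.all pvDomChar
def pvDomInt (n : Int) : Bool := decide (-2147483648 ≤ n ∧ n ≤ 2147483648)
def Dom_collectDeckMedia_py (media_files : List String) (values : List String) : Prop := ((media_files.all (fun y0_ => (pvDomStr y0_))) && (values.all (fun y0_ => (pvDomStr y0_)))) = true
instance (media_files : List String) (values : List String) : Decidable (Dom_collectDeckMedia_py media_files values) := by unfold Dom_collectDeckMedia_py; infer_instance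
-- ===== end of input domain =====

-- B inverts the traversal: media-major first-containing-value bucketing instead of A's value-major scan with a seen set (alternative decomposition, same worst-case cost).

-- ===== PORT A =====
-- A's inner loop body: skip media files already seen; on 'text and media_file in text' record the hit.
def pvStepA (text : String) (st : List String × PySem.Set String) (media_file : String) :
    List String × PySem.Set String :=
  if PySem.Set.contains st.2 media_file then st
  else if (!(text == "")) && PySem.Str.isIn media_file text then
    (st.1 ++ [media_file], PySem.Set.add st.2 media_file)
  else st

-- 'if value is None: continue' and 'text = str(value)' are identity on List String inputs.
def collectDeckMedia_py (media_files : List String) (values : List String) : List String :=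
  (values.foldl (fun st text => media_files.foldl (pvStepA text) st)
    ([], PySem.Set.empty)).1

-- ===== PORT B =====
-- B's inner loop: index of the first non-empty text containing m ('break'), else none.
def pvFirstIdx (m : String) : List String → Nat → Option Nat
  | [], _ => none
  | t :: ts, i => if (!(t == "")) && PySem.Str.isIn m t then some i else pvFirstIdx m ts (i + 1)

-- 'buckets[i].append(m)' for the first containing text, if any.
def pvPlace (texts : List String) (bs : List (List String)) (m : String) : List (List String) :=
  match pvFirstIdx m texts 0 with
  | some i => bs.set i ((bs.getD i []) ++ [m])
  | none => bs

-- texts = values ('if v is not None' / 'str(v)' are identity on List String inputs); final flatten = the flattening comprehension.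
def collectDeckMedia_py_alt (media_files : List String) (values : List String) : List String :=
  ((PySem.List.dedup media_files).foldl (pvPlace values)
    (values.map (fun _ => ([] : List String)))).flatten

-- ===== PRECONDITION & SPEC =====
def Spec_collectDeckMedia_py (media_files : List String) (values : List String) (out : List String) : Prop := out = collectDeckMedia_py_alt media_files values
instance (media_files : List String) (values : List String) (out : List String) : Decidable (Spec_collectDeckMedia_py media_files values out) := by unfold Spec_collectDeckMedia_py; infer_instance

-- ===== CLAIM (what is proved, stated in full; the proofs are below) =====
def Claim_equal_collectDeckMedia_py : Prop := ∀ (media_files : List String) (values : List String), Dom_collectDeckMedia_py media_files values → Spec_collectDeckMedia_py media_files values (collectDeckMedia_py media_files values)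

-- ===== LEMMAS AND PROOFS =====

-- value-major shrinking-candidates step, the common middle form both ports are reduced to
def pvStepMid (st : List String × List String) (text : String) : List String × List String :=
  if text == "" then st
  else (st.1 ++ st.2.filter (fun m => PySem.Str.isIn m text),
        st.2.filter (fun m => !(PySem.Str.isIn m text)))

-- canonical result: for each value index, the candidates whose first containing value is that index
def pvCanon (cands texts : List String) : List String :=
  (List.range texts.length).flatMap
    (fun i => cands.filter (fun m => pvFirstIdx m texts 0 == some i))

-- the list of media files appended by A's inner loop, in order, starting from 'seen'
def pvHits (text : String) (seen : PySem.Set String) : List String → List String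
  | [] => []
  | m :: ms =>
    if PySem.Set.contains seen m then pvHits text seen ms
    else if (!(text == "")) && PySem.Str.isIn m text then m :: pvHits text (seen ++ [m]) ms
    else pvHits text seen ms

-- A's inner fold appends pvHits both to the result and to the seen set
theorem pvInner_eq (text : String) : ∀ (ms : List String) (res seen : List String),
    ms.foldl (pvStepA text) (res, seen)
      = (res ++ pvHits text seen ms, seen ++ pvHits text seen ms) := by
  intro ms
  induction ms with
  | nil => intro res seen; simp [pvHits]
  | cons m ms ih =>
    intro res seen
    rw [List.foldl_cons]
    by_cases hc : m ∈ seen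
    · have h1 : pvStepA text (res, seen) m = (res, seen) := by simp [pvStepA, hc]
      have h2 : pvHits text seen (m :: ms) = pvHits text seen ms := by simp [pvHits, hc]
      rw [h1, h2]; exact ih res seen
    · by_cases ht : text = ""
      · subst ht
        have h1 : pvStepA "" (res, seen) m = (res, seen) := by simp [pvStepA, hc]
        have h2 : pvHits "" seen (m :: ms) = pvHits "" seen ms := by simp [pvHits, hc]
        rw [h1, h2]; exact ih res seen
      · by_cases hm : PySem.Chars.isIn m.toList text.toList = true
        · have h1 : pvStepA text (res, seen) m = (res ++ [m], seen ++ [m]) := by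
            simp [pvStepA, hc, ht, hm]
          have h2 : pvHits text seen (m :: ms) = m :: pvHits text (seen ++ [m]) ms := by
            simp [pvHits, hc, ht, hm]
          rw [h1, h2, ih (res ++ [m]) (seen ++ [m])]; simp
        · have hm' : PySem.Chars.isIn m.toList text.toList = false := by simpa using hm
          have h1 : pvStepA text (res, seen) m = (res, seen) := by simp [pvStepA, hc, hm']
          have h2 : pvHits text seen (m :: ms) = pvHits text seen ms := by simp [pvHits, hc, hm']
          rw [h1, h2]; exact ih res seen

-- pvHits over the raw media list is a filter of the deduplicated candidates still unseen and matching
theorem pvHits_eq_filter (text : String) (h : ¬ text = "") : ∀ (ms seen : List String),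
    pvHits text seen ms
      = (PySem.List.dedup ms).filter
          (fun x => (!(PySem.Set.contains seen x)) && PySem.Chars.isIn x.toList text.toList) := by
  intro ms
  induction ms with
  | nil => intro seen; simp [pvHits, PySem.List.dedup, PySem.Set.ofList]
  | cons m ms ih =>
    intro seen
    have hded : PySem.List.dedup (m :: ms)
        = m :: (PySem.List.dedup ms).filter (fun y => !(y == m)) := by
      rw [PySem.List.dedup_eq_ofList, PySem.List.dedup_eq_ofList]
      exact PySem.Set.ofList_cons m ms
    rw [hded, List.filter_cons]
    by_cases hc : m ∈ seen
    · have h2 : pvHits text seen (m :: ms) = pvHits text seen ms := by simp [pvHits, hc]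
      rw [h2, if_neg (by simp [hc]), ih seen, List.filter_filter]
      apply List.filter_congr
      intro x _
      by_cases hx : x = m
      · subst hx; simp [hc]
      · simp [hx]
    · by_cases hm : PySem.Chars.isIn m.toList text.toList = true
      · have h2 : pvHits text seen (m :: ms) = m :: pvHits text (seen ++ [m]) ms := by
          simp [pvHits, hc, h, hm]
        rw [h2, if_pos (by simp [hc, hm]), ih (seen ++ [m]), List.filter_filter]
        congr 1
        apply List.filter_congr
        intro x _
        by_cases hx : x = m
        · subst hx; simp
        · simp [hx]
      · have hm' : PySem.Chars.isIn m.toList text.toList = false := by simpa using hm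
        have h2 : pvHits text seen (m :: ms) = pvHits text seen ms := by simp [pvHits, hc, hm']
        rw [h2, if_neg (by simp [hm']), ih seen, List.filter_filter]
        apply List.filter_congr
        intro x _
        by_cases hx : x = m
        · subst hx; simp [hm']
        · simp [hx]

-- with empty text, A's inner loop appends nothing
theorem pvHits_empty : ∀ (ms : List String) (seen : PySem.Set String), pvHits "" seen ms = [] := by
  intro ms
  induction ms with
  | nil => intro seen; rfl
  | cons m ms ih =>
    intro seen
    by_cases hc : m ∈ seen
    · simp [pvHits, hc, ih]
    · simp [pvHits, hc, ih]

-- bridge 1: A's fold with (res, seen) tracks the middle fold with (res, unseen deduplicated candidates)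
theorem pvBridge (media_files : List String) : ∀ (values : List String) (res seen : List String),
    (values.foldl (fun st text => media_files.foldl (pvStepA text) st) (res, seen)).1
      = (values.foldl pvStepMid
          (res, (PySem.List.dedup media_files).filter
            (fun m => !(PySem.Set.contains seen m)))).1 := by
  intro values
  induction values with
  | nil => intro res seen; simp
  | cons text values ih =>
    intro res seen
    rw [List.foldl_cons, List.foldl_cons, pvInner_eq]
    by_cases ht : text = ""
    · subst ht
      rw [pvHits_empty]
      rw [show pvStepMid (res, (PySem.List.dedup media_files).filter
            (fun m => !(PySem.Set.contains seen m))) "" = (res, (PySem.List.dedup media_files).filter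
            (fun m => !(PySem.Set.contains seen m))) by simp [pvStepMid]]
      simpa using ih res seen
    · have hL := pvHits_eq_filter text ht media_files seen
      set L := pvHits text seen media_files with hLdef
      have hBstep : pvStepMid (res, (PySem.List.dedup media_files).filter
            (fun m => !(PySem.Set.contains seen m))) text
          = (res ++ ((PySem.List.dedup media_files).filter
              (fun m => !(PySem.Set.contains seen m))).filter
                (fun m => PySem.Str.isIn m text),
             ((PySem.List.dedup media_files).filter
              (fun m => !(PySem.Set.contains seen m))).filter
                (fun m => !(PySem.Str.isIn m text))) := by
        simp [pvStepMid, ht]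
      rw [hBstep, ih]
      have hres : L = ((PySem.List.dedup media_files).filter
            (fun m => !(PySem.Set.contains seen m))).filter
              (fun m => PySem.Str.isIn m text) := by
        rw [hL, List.filter_filter]
        apply List.filter_congr
        intro x _
        simp [Bool.and_comm]
      have hrem : (PySem.List.dedup media_files).filter
            (fun m => !(PySem.Set.contains (seen ++ L) m))
          = ((PySem.List.dedup media_files).filter
              (fun m => !(PySem.Set.contains seen m))).filter
                (fun m => !(PySem.Str.isIn m text)) := by
        rw [List.filter_filter]
        apply List.filter_congr
        intro x hx
        by_cases hc : x ∈ seen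
        · simp [hc]
        · have hmemL : x ∈ L ↔ PySem.Chars.isIn x.toList text.toList = true := by
            have hx' : x ∈ media_files := by simpa using hx
            rw [hL]
            simp [List.mem_filter, hc, hx']
          by_cases hm : PySem.Chars.isIn x.toList text.toList = true
          · have : x ∈ L := hmemL.mpr hm
            simp [hc, hm, this]
          · have hnm : x ∉ L := fun hmem => hm (hmemL.mp hmem)
            have hm' : PySem.Chars.isIn x.toList text.toList = false := by simpa using hm
            simp [hc, hm', hnm]
      rw [hrem, hres]

-- shifting the enumeration index of pvFirstIdx
theorem pvFirstIdx_shift (m : String) : ∀ (ts : List String) (i : Nat),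
    pvFirstIdx m ts (i + 1) = (pvFirstIdx m ts i).map (· + 1) := by
  intro ts
  induction ts with
  | nil => intro i; rfl
  | cons t ts ih =>
    intro i
    simp only [pvFirstIdx]
    split
    · rfl
    · rw [ih]

-- a found index is in range
theorem pvFirstIdx_lt (m : String) : ∀ (ts : List String) (i j : Nat),
    pvFirstIdx m ts i = some j → j < i + ts.length := by
  intro ts
  induction ts with
  | nil => intro i j h; simp [pvFirstIdx] at h
  | cons t ts ih =>
    intro i j h
    simp only [pvFirstIdx] at h
    split at h
    · injection h with h
      simp only [List.length_cons]
      omega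
    · have := ih (i + 1) j h
      simp only [List.length_cons]
      omega

-- bridge 2: the middle fold computes the canonical bucketed result
theorem pvMid_eq_canon : ∀ (vs cands res : List String),
    (vs.foldl pvStepMid (res, cands)).1 = res ++ pvCanon cands vs := by
  intro vs
  induction vs with
  | nil => intro cands res; simp [pvCanon]
  | cons t vs ih =>
    intro cands res
    have hcanon : pvCanon cands (t :: vs)
        = cands.filter (fun m => pvFirstIdx m (t :: vs) 0 == some 0)
          ++ (List.range vs.length).flatMap
              (fun i => cands.filter (fun m => pvFirstIdx m (t :: vs) 0 == some (i + 1))) := by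
      unfold pvCanon
      rw [List.length_cons, List.range_succ_eq_map, List.flatMap_cons, List.flatMap_map]
    by_cases ht : t = ""
    · subst ht
      have hstep : pvStepMid (res, cands) "" = (res, cands) := by simp [pvStepMid]
      rw [List.foldl_cons, hstep, ih]
      congr 1
      rw [hcanon]
      have h0 : cands.filter (fun m => pvFirstIdx m ("" :: vs) 0 == some 0) = [] := by
        apply List.filter_eq_nil_iff.mpr
        intro m _
        simp [pvFirstIdx, pvFirstIdx_shift]
      rw [h0, List.nil_append]
      unfold pvCanon
      apply List.flatMap_congr  -- congruence over the range
      intro i _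
      apply List.filter_congr
      intro m _
      simp [pvFirstIdx, pvFirstIdx_shift]
    · have hstep : pvStepMid (res, cands) t
          = (res ++ cands.filter (fun m => PySem.Str.isIn m t),
             cands.filter (fun m => !(PySem.Str.isIn m t))) := by
        simp [pvStepMid, ht]
      rw [List.foldl_cons, hstep, ih, hcanon]
      have h0 : cands.filter (fun m => pvFirstIdx m (t :: vs) 0 == some 0)
          = cands.filter (fun m => PySem.Str.isIn m t) := by
        apply List.filter_congr
        intro m _
        by_cases hm : PySem.Chars.isIn m.toList t.toList = true
        · simp [pvFirstIdx, ht, hm]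
        · have hm' : PySem.Chars.isIn m.toList t.toList = false := by simpa using hm
          simp [pvFirstIdx, hm', pvFirstIdx_shift]
    
      have hrest : (List.range vs.length).flatMap
            (fun i => cands.filter (fun m => pvFirstIdx m (t :: vs) 0 == some (i + 1)))
          = pvCanon (cands.filter (fun m => !(PySem.Str.isIn m t))) vs := by
        unfold pvCanon
        apply List.flatMap_congr
        intro i _
        rw [List.filter_filter]
        apply List.filter_congr
        intro m _
        by_cases hm : PySem.Chars.isIn m.toList t.toList = true
        · simp [pvFirstIdx, ht, hm]
        · have hm' : PySem.Chars.isIn m.toList t.toList = false := by simpa using hm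
          simp [pvFirstIdx, hm', pvFirstIdx_shift]
      rw [h0, hrest, List.append_assoc]

-- bridge 3: B's bucket fold builds, bucket by bucket, the per-index filters of the processed media
theorem pvPlace_fold (texts : List String) : ∀ (cands p : List String),
    cands.foldl (pvPlace texts)
      ((List.range texts.length).map
        (fun j => p.filter (fun m => pvFirstIdx m texts 0 == some j)))
      = (List.range texts.length).map
        (fun j => (p ++ cands).filter (fun m => pvFirstIdx m texts 0 == some j)) := by
  intro cands
  induction cands with
  | nil => intro p; simp
  | cons m cs ih =>
    intro p
    rw [List.foldl_cons]
    have hstep : pvPlace texts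
        ((List.range texts.length).map
          (fun j => p.filter (fun m => pvFirstIdx m texts 0 == some j))) m
        = (List.range texts.length).map
          (fun j => (p ++ [m]).filter (fun x => pvFirstIdx x texts 0 == some j)) := by
      cases hfi : pvFirstIdx m texts 0 with
      | none =>
        simp only [pvPlace, hfi]
        apply List.map_congr_left
        intro j _
        rw [List.filter_append]
        simp [hfi]
      | some i =>
        have hi : i < texts.length := by
          have := pvFirstIdx_lt m texts 0 i hfi
          omega
        have hget : ((List.range texts.length).map
            (fun j => p.filter (fun x => pvFirstIdx x texts 0 == some j))).getD i []
            = p.filter (fun x => pvFirstIdx x texts 0 == some i) := by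
          rw [List.getD_eq_getElem?_getD, List.getElem?_map, List.getElem?_range hi]
          rfl
        simp only [pvPlace, hfi]
        rw [hget]
        apply List.ext_getElem
        · simp
        · intro j hj1 hj2
          rw [List.getElem_set]
          simp only [List.getElem_map, List.getElem_range]
          have hjlen : j < texts.length := by simpa using hj2
          by_cases hij : i = j
          · subst hij
            rw [if_pos rfl, List.filter_append]
            simp [hfi]
          · rw [if_neg hij, List.filter_append]
            have : ([m].filter (fun x => pvFirstIdx x texts 0 == some j)) = [] := by
              simp [hfi, hij]
            rw [this, List.append_nil]
    rw [hstep, ih (p ++ [m]), List.append_assoc]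
    rfl

-- B's port equals the canonical result on the deduplicated media list
theorem pvAlt_eq_canon (media_files values : List String) :
    collectDeckMedia_py_alt media_files values
      = pvCanon (PySem.List.dedup media_files) values := by
  unfold collectDeckMedia_py_alt
  have hinit : values.map (fun _ => ([] : List String))
      = (List.range values.length).map
        (fun j => ([] : List String).filter (fun m => pvFirstIdx m values 0 == some j)) := by
    simp [List.map_const']
  rw [hinit, pvPlace_fold values (PySem.List.dedup media_files) []]
  unfold pvCanon
  rw [List.flatMap_def]
  simp

-- ===== VERDICT (by name: the statement is the Claim_ definition above) =====
theorem collectDeckMedia_py_spec : Claim_equal_collectDeckMedia_py := by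
  intro media_files values _
  unfold Spec_collectDeckMedia_py collectDeckMedia_py
  rw [show (PySem.Set.empty : PySem.Set String) = ([] : List String) from rfl, pvBridge,
    pvAlt_eq_canon]
  have : (PySem.List.dedup media_files).filter
      (fun m => !(PySem.Set.contains ([] : List String) m)) = PySem.List.dedup media_files := by
    simp [PySem.Set.contains]
  rw [this, pvMid_eq_canon, List.nil_append]
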